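-- pv_equiv track=rewrite | github.com/takeshun256/PauseNormEffect | src/pausenormeffect/preprocess/pause_ranges_and_labm_to_morps.py | insert_no_pause
-- ===== SOURCE A (Python) =====
-- def insert_no_pause(ss):
--     # [NO_PAUSE]を挿入する morp_pause_clip => morp_pause_clip_no_pause
--     result = []
--     for i in range(len(ss)):
--         # リストの先頭と最後にも[NO_PAUSE]を入れるための条件分岐
--         if i == 0 and "PAUSE" not in ss[i]:
--             result.append("[NO_PAUSE]")
--         elif i > 0 and "PAUSE" not in ss[i-1] and "PAUSE" not in ss[i]:
--             result.append("[NO_PAUSE]")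
--         result.append(ss[i])
--         if i == len(ss) - 1 and "PAUSE" not in ss[i]:
--             result.append("[NO_PAUSE]")
--     return result
-- ===== SOURCE B (Python) =====
-- from itertools import groupby
--
--
-- def insert_no_pause(ss):
--     # Two-stage run-length approach: first group ss into maximal runs of
--     # pause / non-pause tokens, then render each run: pause runs pass through
--     # untouched; a non-pause run [a, b, c] becomes a, [NO_PAUSE], b, [NO_PAUSE], c
--     # with a leading marker only if the run starts the whole list and a trailing
--     # marker only if it ends it (a marker belongs to a gap iff no pause token
--     # touches that gap, and pause runs absorb their adjacent gaps).
--     groups = [(is_pause, list(g)) for is_pause, g in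
--               groupby(ss, key=lambda t: "PAUSE" in t)]
--
--     def render(gs, first):
--         if not gs:
--             return []
--         (is_pause, g), rest = gs[0], gs[1:]
--         if is_pause:
--             return g + render(rest, False)
--         seg = ["[NO_PAUSE]"] if first else []
--         seg.append(g[0])
--         for t in g[1:]:
--             seg += ["[NO_PAUSE]", t]
--         if not rest:
--             seg.append("[NO_PAUSE]")
--         return seg + render(rest, False)
--
--     return render(groups, True)
-- ===== Notes on version B (the rewrite author's own statement) =====
-- stated objective: alternative
-- what changed: Replaces A's per-index gap scan with i==0/i>0/i==len-1 boundary branches by a two-stage run-length algorithm: group the list into maximal runs of pause/non-pause tokens (itertools.groupby), then render each run independently (pause runs pass through; non-pause runs get markers between their tokens and at list ends).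
import Mathlib
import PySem

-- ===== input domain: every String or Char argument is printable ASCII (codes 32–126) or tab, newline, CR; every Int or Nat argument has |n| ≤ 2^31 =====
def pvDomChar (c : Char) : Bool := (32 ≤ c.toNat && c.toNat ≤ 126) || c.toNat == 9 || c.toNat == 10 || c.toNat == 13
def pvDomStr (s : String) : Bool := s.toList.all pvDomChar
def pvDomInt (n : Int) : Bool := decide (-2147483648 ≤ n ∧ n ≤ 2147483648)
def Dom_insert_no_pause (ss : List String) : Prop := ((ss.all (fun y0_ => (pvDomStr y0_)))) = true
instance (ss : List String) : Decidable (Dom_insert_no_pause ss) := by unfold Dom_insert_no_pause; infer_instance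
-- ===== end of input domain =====

-- B replaces A's per-index gap scan (i==0/i>0/i==len-1 branches) by a two-stage
-- run-length algorithm: group into maximal pause/non-pause runs, then render each run.

-- ===== PORT A =====
-- literal port of A's 'for i in range(len(ss))' loop; indices produced by the range are
-- in range, so pyGetD's default "" is never consulted.
def insert_no_pause (ss : List String) : List String :=
  (PySem.List.pyRange 0 (ss.length : Int) 1).foldl (fun result i =>
    let result :=
      if i = 0 ∧ PySem.Str.isIn "PAUSE" (PySem.List.pyGetD ss i "") = false then
        result ++ ["[NO_PAUSE]"]
      else if 0 < i ∧ PySem.Str.isIn "PAUSE" (PySem.List.pyGetD ss (i - 1) "") = false ∧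
          PySem.Str.isIn "PAUSE" (PySem.List.pyGetD ss i "") = false then
        result ++ ["[NO_PAUSE]"]
      else result
    let result := result ++ [PySem.List.pyGetD ss i ""]
    if i = (ss.length : Int) - 1 ∧ PySem.Str.isIn "PAUSE" (PySem.List.pyGetD ss i "") = false then
      result ++ ["[NO_PAUSE]"]
    else result) []

-- ===== PORT B =====
-- Source B's grouping key: "PAUSE" in t
def pvIsP (s : String) : Bool := PySem.Str.isIn "PAUSE" s

-- port of itertools.groupby(ss, key = "PAUSE" in t), materialized as (key, run) pairs
def pyGroupByPause : List String → List (Bool × List String)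
  | [] => []
  | x :: xs =>
    match pyGroupByPause xs with
    | [] => [(pvIsP x, [x])]
    | (k, g) :: rest =>
      if pvIsP x = k then (k, x :: g) :: rest
      else (pvIsP x, [x]) :: (k, g) :: rest

-- the 'for t in g[1:]: seg += ["[NO_PAUSE]", t]' loop of Source B's render
def pvBetween : List String → List String
  | [] => []
  | t :: ts => "[NO_PAUSE]" :: t :: pvBetween ts

-- Source B's recursive render over the group list (groups produced by groupby are
-- never empty, so the inner 'match g' [] arm is unreachable)
def pvRender : List (Bool × List String) → Bool → List String
  | [], _ => []
  | (isP, g) :: rest, first =>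
    if isP then g ++ pvRender rest false
    else
      ((if first then ["[NO_PAUSE]"] else []) ++
       (match g with | [] => [] | t :: ts => t :: pvBetween ts) ++
       (if rest = [] then ["[NO_PAUSE]"] else [])) ++ pvRender rest false

def insert_no_pause_alt (ss : List String) : List String :=
  pvRender (pyGroupByPause ss) true

-- ===== PRECONDITION & SPEC =====
def Spec_insert_no_pause (ss : List String) (out : List String) : Prop := out = insert_no_pause_alt ss
instance (ss : List String) (out : List String) : Decidable (Spec_insert_no_pause ss out) := by unfold Spec_insert_no_pause; infer_instance

-- ===== CLAIM (what is proved, stated in full; the proofs are below) =====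
def Claim_equal_insert_no_pause : Prop := ∀ (ss : List String), Dom_insert_no_pause ss → Spec_insert_no_pause ss (insert_no_pause ss)

-- ===== LEMMAS AND PROOFS =====

-- marker emitted for the gap between tokens p and x
def pvEmit (p x : String) : List String :=
  if PySem.Str.isIn "PAUSE" p = false ∧ PySem.Str.isIn "PAUSE" x = false then ["[NO_PAUSE]"] else []

-- markers+tokens of the gap pass (no trailing marker)
def pvChain (prev : String) : List String → List String
  | [] => []
  | x :: xs => pvEmit prev x ++ x :: pvChain x xs

-- same, with the trailing marker folded into the last step (A's shape)
def pvChainT (prev : String) : List String → List String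
  | [] => []
  | [x] => pvEmit prev x ++ x ::
      (if PySem.Str.isIn "PAUSE" x = false then ["[NO_PAUSE]"] else [])
  | x :: y :: xs => pvEmit prev x ++ x :: pvChainT x (y :: xs)

lemma pv_getD_mid (pre xs : List String) (x : String) :
    (pre ++ x :: xs).getD pre.length "" = x := by
  simp [List.getD_eq_getElem?_getD]

lemma pv_getD_last (pre t : List String) (h : pre ≠ []) :
    (pre ++ t).getD (pre.length - 1) "" = pre.getLastD "" := by
  have hl : 0 < pre.length := List.length_pos_iff.mpr h
  have hlt : pre.length - 1 < pre.length := by omega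
  simp [List.getD_eq_getElem?_getD, List.getElem?_append_left hlt,
    List.getElem?_eq_getElem hlt, List.getLast?_eq_getElem?]

lemma pv_getLast_cons (prev x : String) (xs : List String) :
    (x :: xs).getLast?.getD prev = xs.getLast?.getD x := by
  cases xs with
  | nil => simp
  | cons h t =>
    obtain ⟨v, hv⟩ := Option.isSome_iff_exists.mp (by simp : (h :: t).getLast?.isSome)
    simp [List.getLast?_cons_cons, hv]

lemma pv_getLastD_cons (prev x : String) (xs : List String) :
    (x :: xs).getLastD prev = xs.getLastD x := by
  rw [List.getLastD_eq_getLast?, List.getLastD_eq_getLast?, pv_getLast_cons]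

set_option maxRecDepth 4096 in
lemma pv_foldA (ss : List String) : ∀ (rest pre acc : List String), ss = pre ++ rest →
    (PySem.List.pyRange (pre.length : Int) (ss.length : Int) 1).foldl (fun result i =>
      let result :=
        if i = 0 ∧ PySem.Str.isIn "PAUSE" (PySem.List.pyGetD ss i "") = false then
          result ++ ["[NO_PAUSE]"]
        else if 0 < i ∧ PySem.Str.isIn "PAUSE" (PySem.List.pyGetD ss (i - 1) "") = false ∧
            PySem.Str.isIn "PAUSE" (PySem.List.pyGetD ss i "") = false then
          result ++ ["[NO_PAUSE]"]
        else result
      let result := result ++ [PySem.List.pyGetD ss i ""]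
      if i = (ss.length : Int) - 1 ∧ PySem.Str.isIn "PAUSE" (PySem.List.pyGetD ss i "") = false then
        result ++ ["[NO_PAUSE]"]
      else result) acc
    = acc ++ pvChainT (pre.getLastD "") rest := by
  intro rest
  induction rest with
  | nil =>
    intro pre acc hss
    have : (ss.length : Int) ≤ (pre.length : Int) := by simp [hss]
    rw [PySem.List.pyRange_one_eq_nil this]
    simp [pvChainT]
  | cons x xs ih =>
    intro pre acc hss
    have hlen : ss.length = pre.length + xs.length + 1 := by simp [hss]; omega
    have hlt : (pre.length : Int) < (ss.length : Int) := by
      rw [hlen]; push_cast; omega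
    rw [PySem.List.pyRange_one_cons hlt, List.foldl_cons]
    have hget : PySem.List.pyGetD ss (pre.length : Int) "" = x := by
      simp only [PySem.List.pyGetD_natCast, hss, pv_getD_mid]
    have hbranch : ∀ result : List String,
        (if (pre.length : Int) = 0 ∧ PySem.Str.isIn "PAUSE" x = false then
          result ++ ["[NO_PAUSE]"]
        else if 0 < (pre.length : Int) ∧
            PySem.Str.isIn "PAUSE" (PySem.List.pyGetD ss ((pre.length : Int) - 1) "") = false ∧
            PySem.Str.isIn "PAUSE" x = false then
          result ++ ["[NO_PAUSE]"]
        else result) = result ++ pvEmit (pre.getLastD "") x := by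
      intro result
      cases pre with
      | nil =>
        simp only [List.length_nil, Nat.cast_zero, List.getLastD_nil]
        simp [pvEmit]
        split_ifs <;>
          simp_all [show PySem.Chars.isIn ['P','A','U','S','E'] ([] : List Char) = false from by decide]
      | cons p ps =>
        have h0 : ¬ (((p :: ps).length : Int) = 0) := by
          intro h; rw [List.length_cons] at h; omega
        have hpos : (0 : Int) < ((p :: ps).length : Int) := by positivity
        have hgetp : PySem.List.pyGetD ss (((p :: ps).length : Int) - 1) "" = (p :: ps).getLastD "" := by
          have hc : (((p :: ps).length : Int) - 1) = (((p :: ps).length - 1 : Nat) : Int) := by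
            omega
          rw [hc, PySem.List.pyGetD_natCast, hss]
          exact pv_getD_last _ _ (by simp)
        have hne0 : ¬ ((((p :: ps).length : Int) = 0) ∧ PySem.Str.isIn "PAUSE" x = false) :=
          fun h => h0 h.1
        rw [if_neg hne0, hgetp]
        simp only [hpos, true_and]
        simp [pvEmit]
        split_ifs <;> simp_all
    have hss' : ss = (pre ++ [x]) ++ xs := by simp [hss]
    have step : ((pre.length : Int) + 1) = (((pre ++ [x]).length : Nat) : Int) := by simp
    simp only [hget, hbranch]
    by_cases hend : xs = []
    · subst hend
      have hi : (pre.length : Int) = (ss.length : Int) - 1 := by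
        rw [hlen]; push_cast [List.length_nil]; ring
      rw [step, ih (pre ++ [x]) _ hss']
      simp only [hi, true_and]
      rw [show pvChainT ((pre ++ [x]).getLastD "") [] = [] from rfl]
      rw [show pvChainT (pre.getLastD "") [x]
            = pvEmit (pre.getLastD "") x ++ x ::
              (if PySem.Str.isIn "PAUSE" x = false then ["[NO_PAUSE]"] else []) from rfl]
      split_ifs <;> simp
    · have hi : ¬ ((pre.length : Int) = (ss.length : Int) - 1) := by
        rw [hlen]
        have : xs.length ≠ 0 := by simpa using hend
        push_cast; omega
      rw [step, ih (pre ++ [x]) _ hss']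
      obtain ⟨y, ys, rfl⟩ := List.exists_cons_of_ne_nil hend
      rw [if_neg (by simp [hi])]
      simp [pvChainT]

lemma pv_A_eq (ss : List String) : insert_no_pause ss = pvChainT "" ss := by
  unfold insert_no_pause
  have := pv_foldA ss ss [] [] (by simp)
  simpa using this

lemma pv_chainT_eq (l : List String) : ∀ (prev : String), l ≠ [] →
    pvChainT prev l = pvChain prev l ++
      (if PySem.Str.isIn "PAUSE" (l.getLastD "") = false then ["[NO_PAUSE]"] else []) := by
  induction l with
  | nil => intro _ h; exact absurd rfl h
  | cons x xs ih =>
    intro prev _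
    cases xs with
    | nil => simp [pvChainT, pvChain]
    | cons y ys =>
      rw [pvChainT, pvChain, ih x (by simp)]
      simp [pv_getLast_cons]

-- ===== B-side run lemmas =====

def pvHeadKey : List (Bool × List String) → Option Bool
  | [] => none
  | (k, _) :: _ => some k

def pvValid : List (Bool × List String) → Prop
  | [] => True
  | (k, g) :: rest => g ≠ [] ∧ (∀ x ∈ g, pvIsP x = k) ∧ pvHeadKey rest ≠ some k ∧ pvValid rest

def pvFlat (gs : List (Bool × List String)) : List String := (gs.map Prod.snd).flatten

lemma pv_flat_groupBy (l : List String) : pvFlat (pyGroupByPause l) = l := by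
  induction l with
  | nil => rfl
  | cons x xs ih =>
    rw [pyGroupByPause]
    cases h : pyGroupByPause xs with
    | nil => rw [h] at ih; simpa [pvFlat] using ih
    | cons p rest =>
      obtain ⟨k, g⟩ := p
      rw [h] at ih
      dsimp only
      split_ifs <;> simpa [pvFlat] using ih

lemma pv_valid_groupBy (l : List String) : pvValid (pyGroupByPause l) := by
  induction l with
  | nil => trivial
  | cons x xs ih =>
    rw [pyGroupByPause]
    cases h : pyGroupByPause xs with
    | nil => exact ⟨by simp, by simp, by simp [pvHeadKey], trivial⟩
    | cons p rest =>
      obtain ⟨k, g⟩ := p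
      rw [h] at ih
      obtain ⟨hg, hkey, hhd, hv⟩ := ih
      dsimp only
      split_ifs with he
      · exact ⟨by simp, by
          intro y hy
          rcases List.mem_cons.mp hy with rfl | hy
          · exact he
          · exact hkey y hy, hhd, hv⟩
      · exact ⟨by simp, by simp, by simp [pvHeadKey, Ne.symm he], hg, hkey, hhd, hv⟩

lemma pv_getLastD_mem (g : List String) (d : String) (h : g ≠ []) : g.getLastD d ∈ g := by
  rw [List.getLastD_eq_getLast?]
  obtain ⟨a, ha⟩ := Option.isSome_iff_exists.mp (List.getLast?_isSome.mpr h)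
  rw [ha]
  exact List.mem_of_getLast? ha

lemma pv_chainT_append (b : List String) (hb : b ≠ []) : ∀ (a : List String) (prev : String),
    pvChainT prev (a ++ b) = pvChain prev a ++ pvChainT (a.getLastD prev) b := by
  intro a
  induction a with
  | nil => intro prev; simp [pvChain]
  | cons x xs ih =>
    intro prev
    have hne : xs ++ b ≠ [] := by simp [hb]
    obtain ⟨z, zs, hz⟩ := List.exists_cons_of_ne_nil hne
    have : (x :: xs) ++ b = x :: z :: zs := by simp [← hz]
    rw [this, pvChainT, ← hz, ih x, pvChain]
    rw [pv_getLastD_cons prev x xs]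
    simp

lemma pv_chain_pause (g : List String) : (∀ x ∈ g, pvIsP x = true) →
    ∀ prev, pvChain prev g = g := by
  induction g with
  | nil => intro _ _; rfl
  | cons x xs ih =>
    intro h prev
    have hx : pvIsP x = true := h x (by simp)
    rw [pvChain, ih (fun y hy => h y (List.mem_cons_of_mem _ hy)) x]
    simp [pvEmit, pvIsP] at hx ⊢
    simp [hx]

lemma pv_chainT_pause (g : List String) (prev : String) (hg : g ≠ [])
    (h : ∀ x ∈ g, pvIsP x = true) : pvChainT prev g = g := by
  rw [pv_chainT_eq g prev hg, pv_chain_pause g h prev]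
  have := h _ (pv_getLastD_mem g "" hg)
  simp [pvIsP] at this
  simp [this]

lemma pv_chain_nopause (ts : List String) : (∀ x ∈ ts, pvIsP x = false) →
    ∀ t, pvIsP t = false → pvChain t ts = pvBetween ts := by
  induction ts with
  | nil => intro _ _ _; rfl
  | cons y ys ih =>
    intro h t ht
    have hy : pvIsP y = false := h y (by simp)
    rw [pvChain, ih (fun z hz => h z (List.mem_cons_of_mem _ hz)) y hy, pvBetween]
    simp [pvIsP] at ht hy
    simp [pvEmit, ht, hy]

lemma pv_render_flag (gs : List (Bool × List String)) (a b : Bool)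
    (h : pvHeadKey gs ≠ some false) : pvRender gs a = pvRender gs b := by
  cases gs with
  | nil => rfl
  | cons p rest =>
    obtain ⟨k, g⟩ := p
    cases k with
    | false => exact absurd rfl h
    | true => simp [pvRender]

lemma pv_main (gs : List (Bool × List String)) : ∀ prev, pvValid gs →
    pvChainT prev (pvFlat gs) = pvRender gs (!pvIsP prev) := by
  induction gs with
  | nil => intro prev _; rfl
  | cons p rest ih =>
    intro prev hv
    obtain ⟨k, g⟩ := p
    obtain ⟨hg, hkey, hhd, hvr⟩ := hv
    have hflat : pvFlat ((k, g) :: rest) = g ++ pvFlat rest := by simp [pvFlat]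
    rw [hflat]
    by_cases hr : rest = []
    · subst hr
      rw [show pvFlat ([] : List (Bool × List String)) = [] from rfl, List.append_nil]
      cases k with
      | true =>
        rw [pv_chainT_pause g prev hg hkey]
        simp [pvRender]
      | false =>
        obtain ⟨t, ts, rfl⟩ := List.exists_cons_of_ne_nil hg
        have ht : pvIsP t = false := hkey t (by simp)
        have hts : ∀ x ∈ ts, pvIsP x = false := fun x hx => hkey x (by simp [hx])
        have hlast : pvIsP ((t :: ts).getLastD "") = false :=
          hkey _ (pv_getLastD_mem _ "" (by simp))
        rw [pv_chainT_eq _ prev (by simp), pvChain,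
          pv_chain_nopause ts hts t ht]
        simp [pvIsP, PySem.Str.isIn] at ht hlast
        by_cases h : PySem.Chars.isIn ['P','A','U','S','E'] prev.toList = false <;>
          simp [pvRender, pvEmit, PySem.Str.isIn, pvIsP, ht, hlast, h,
            List.getLastD_eq_getLast?]
    · have hflatr : pvFlat rest ≠ [] := by
        obtain ⟨q, rs, rfl⟩ := List.exists_cons_of_ne_nil hr
        obtain ⟨k', g'⟩ := q
        obtain ⟨hg', -, -, -⟩ := hvr
        obtain ⟨u, us, rfl⟩ := List.exists_cons_of_ne_nil hg'
        simp [pvFlat]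
      rw [pv_chainT_append _ hflatr g prev, ih _ hvr]
      have hlastk : pvIsP (g.getLastD prev) = k := hkey _ (pv_getLastD_mem g prev hg)
      rw [hlastk]
      cases k with
      | true =>
        rw [pv_chain_pause g hkey prev]
        simp [pvRender]
      | false =>
        have hhd' : pvHeadKey rest ≠ some false := hhd
        rw [pv_render_flag rest (!false) false hhd']
        obtain ⟨t, ts, rfl⟩ := List.exists_cons_of_ne_nil hg
        have ht : pvIsP t = false := hkey t (by simp)
        have hts : ∀ x ∈ ts, pvIsP x = false := fun x hx => hkey x (by simp [hx])
        rw [pvChain, pv_chain_nopause ts hts t ht]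
        simp [pvIsP, PySem.Str.isIn] at ht
        by_cases h : PySem.Chars.isIn ['P','A','U','S','E'] prev.toList = false <;>
          simp [pvRender, pvEmit, PySem.Str.isIn, pvIsP, ht, hr, h]

-- ===== VERDICT (by name: the statement is the Claim_ definition above) =====
theorem insert_no_pause_spec : Claim_equal_insert_no_pause := by
  intro ss _
  unfold Spec_insert_no_pause insert_no_pause_alt
  rw [pv_A_eq]
  have h := pv_main (pyGroupByPause ss) "" (pv_valid_groupBy ss)
  rw [pv_flat_groupBy ss] at h
  rw [h, show (!pvIsP "") = true from by decide]
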